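-- pv_equiv track=rewrite | github.com/YRRING/multi-player-game-ai-project | agents/ai_bots/snake_ai.py | _greedy_move_to_food
-- ===== SOURCE A (Python) =====
-- from typing import List, Tuple, Any, Optional, Dict, Set
--
-- def _greedy_move_to_food(head: Tuple[int, int], target_food: Tuple[int, int],
--                        safe_actions: List[Tuple[int, int]]) -> Optional[Tuple[int, int]]:
--     """贪心移动到食物"""
--     dx = target_food[0] - head[0]
--     dy = target_food[1] - head[1]
--
--     preferred_actions = []
--
--     if abs(dx) > abs(dy):
--         if dx > 0:
--             preferred_actions.append((1, 0))
--         elif dx < 0: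
--             preferred_actions.append((-1, 0))
--
--         if dy > 0:
--             preferred_actions.append((0, 1))
--         elif dy < 0:
--             preferred_actions.append((0, -1))
--     else:
--         if dy > 0:
--             preferred_actions.append((0, 1))
--         elif dy < 0:
--             preferred_actions.append((0, -1))
--
--         if dx > 0:
--             preferred_actions.append((1, 0))
--         elif dx < 0:
--             preferred_actions.append((-1, 0))
--
--     for action in preferred_actions:
--         if action in safe_actions:
--             return action
--
--     return None
-- ===== SOURCE B (Python) =====
-- def _greedy_move_to_food(head, target_food, safe_actions):
--     """Single pass over safe_actions: score each action with a priority
--     (2 = move along the larger-gap axis toward food, 1 = secondary axis,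
--     0 = anything else) and keep the highest-scoring safe action."""
--     dx = target_food[0] - head[0]
--     dy = target_food[1] - head[1]
--
--     def priority(a):
--         if dx != 0 and a == ((1, 0) if dx > 0 else (-1, 0)):
--             return 2 if abs(dx) > abs(dy) else 1
--         if dy != 0 and a == ((0, 1) if dy > 0 else (0, -1)):
--             return 1 if abs(dx) > abs(dy) else 2
--         return 0
--
--     best, best_p = None, 0
--     for a in safe_actions:
--         p = priority(a)
--         if p > best_p:
--             best, best_p = a, p
--     return best
-- ===== Notes on version B (the rewrite author's own statement) =====
-- stated objective: alternative
-- what changed: Inverts the traversal: instead of building an ordered preferred-move list and testing each for membership in safe_actions, B makes one pass over safe_actions itself, scoring each action with a priority function (2 preferred axis, 1 secondary, 0 other) and keeping the maximum-priority action.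
import Mathlib
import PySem

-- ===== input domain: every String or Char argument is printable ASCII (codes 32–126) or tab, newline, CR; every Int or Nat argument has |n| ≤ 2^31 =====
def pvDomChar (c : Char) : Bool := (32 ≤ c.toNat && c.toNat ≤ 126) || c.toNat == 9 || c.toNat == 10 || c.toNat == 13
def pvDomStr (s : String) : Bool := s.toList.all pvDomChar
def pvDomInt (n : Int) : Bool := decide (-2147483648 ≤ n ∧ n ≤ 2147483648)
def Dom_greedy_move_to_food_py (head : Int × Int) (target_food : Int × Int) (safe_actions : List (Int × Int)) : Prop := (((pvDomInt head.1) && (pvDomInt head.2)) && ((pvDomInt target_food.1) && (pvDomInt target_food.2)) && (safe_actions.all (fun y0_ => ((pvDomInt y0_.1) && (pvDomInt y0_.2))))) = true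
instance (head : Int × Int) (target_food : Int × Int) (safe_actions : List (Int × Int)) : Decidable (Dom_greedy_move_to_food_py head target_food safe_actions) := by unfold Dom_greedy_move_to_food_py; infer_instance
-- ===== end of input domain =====

-- B inverts the traversal: one pass over safe_actions keeping the max-priority action,
-- instead of A's ordered preferred-move list tested for membership (objective: alternative).

-- ===== PORT A =====
def greedy_move_to_food_py (head : Int × Int) (target_food : Int × Int) (safe_actions : List (Int × Int)) : Option (Int × Int) :=
  let dx := target_food.1 - head.1
  let dy := target_food.2 - head.2
  let preferred_actions : List (Int × Int) :=
    if |dx| > |dy| then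
      (if dx > 0 then [((1 : Int), (0 : Int))] else if dx < 0 then [(-1, 0)] else []) ++
      (if dy > 0 then [((0 : Int), (1 : Int))] else if dy < 0 then [(0, -1)] else [])
    else
      (if dy > 0 then [((0 : Int), (1 : Int))] else if dy < 0 then [(0, -1)] else []) ++
      (if dx > 0 then [((1 : Int), (0 : Int))] else if dx < 0 then [(-1, 0)] else [])
  preferred_actions.find? (fun action => safe_actions.contains action)

-- ===== PORT B =====
def greedy_move_to_food_py_alt (head : Int × Int) (target_food : Int × Int) (safe_actions : List (Int × Int)) : Option (Int × Int) :=
  let dx := target_food.1 - head.1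
  let dy := target_food.2 - head.2
  let priority : (Int × Int) → Int := fun a =>
    if dx ≠ 0 ∧ a = (if dx > 0 then ((1 : Int), (0 : Int)) else (-1, 0)) then
      (if |dx| > |dy| then 2 else 1)
    else if dy ≠ 0 ∧ a = (if dy > 0 then ((0 : Int), (1 : Int)) else (0, -1)) then
      (if |dx| > |dy| then 1 else 2)
    else 0
  (safe_actions.foldl
    (fun st a => let p := priority a; if p > st.2 then (some a, p) else st)
    ((none : Option (Int × Int)), (0 : Int))).1

-- ===== PRECONDITION & SPEC =====
def Spec_greedy_move_to_food_py (head : Int × Int) (target_food : Int × Int) (safe_actions : List (Int × Int)) (out : Option (Int × Int)) : Prop := out = greedy_move_to_food_py_alt head target_food safe_actions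
instance (head : Int × Int) (target_food : Int × Int) (safe_actions : List (Int × Int)) (out : Option (Int × Int)) : Decidable (Spec_greedy_move_to_food_py head target_food safe_actions out) := by unfold Spec_greedy_move_to_food_py; infer_instance

-- ===== CLAIM (what is proved, stated in full; the proofs are below) =====
def Claim_equal_greedy_move_to_food_py : Prop := ∀ (head : Int × Int) (target_food : Int × Int) (safe_actions : List (Int × Int)), Dom_greedy_move_to_food_py head target_food safe_actions → Spec_greedy_move_to_food_py head target_food safe_actions (greedy_move_to_food_py head target_food safe_actions)

-- ===== LEMMAS AND PROOFS =====

-- abbreviation for B's fold step (proof-side only)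
def pvStep (f : (Int × Int) → Int) (st : Option (Int × Int) × Int) (a : Int × Int) :
    Option (Int × Int) × Int :=
  if f a > st.2 then (some a, f a) else st

theorem pv_fold_zero (f : (Int × Int) → Int) (h : ∀ a, f a = 0) (sa : List (Int × Int)) :
    (sa.foldl (pvStep f) (none, 0)).1 = none := by
  induction sa with
  | nil => rfl
  | cons a t ih => simpa [pvStep, h] using ih

theorem pv_fold_top (f : (Int × Int) → Int) (hle : ∀ a, f a ≤ 2) (x : Int × Int)
    (sa : List (Int × Int)) :
    sa.foldl (pvStep f) (some x, 2) = (some x, 2) := by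
  induction sa with
  | nil => rfl
  | cons a t ih =>
    have : ¬ f a > 2 := by have := hle a; omega
    simpa [pvStep, this] using ih

theorem pv_fold_one (f : (Int × Int) → Int) (m2 : Int × Int) (h2 : f m2 = 2)
    (hle : ∀ a, f a ≤ 2) (hother : ∀ a, a ≠ m2 → f a ≤ 1)
    (b : Option (Int × Int)) (sa : List (Int × Int)) :
    (sa.foldl (pvStep f) (b, 1)).1 = if m2 ∈ sa then some m2 else b := by
  induction sa with
  | nil => simp
  | cons a t ih =>
    by_cases ha : a = m2
    · subst ha
      simp [pvStep, h2, pv_fold_top f hle]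
    · have : ¬ f a > 1 := by have := hother a ha; omega
      simp [pvStep, this, ih, ha, Ne.symm ha]

theorem pv_fold_main (f : (Int × Int) → Int) (m2 m1 : Int × Int) (hne : m2 ≠ m1)
    (h2 : f m2 = 2) (h1 : f m1 = 1) (h0 : ∀ a, a ≠ m2 → a ≠ m1 → f a = 0)
    (sa : List (Int × Int)) :
    (sa.foldl (pvStep f) (none, 0)).1 =
      if m2 ∈ sa then some m2 else if m1 ∈ sa then some m1 else none := by
  have hle : ∀ a, f a ≤ 2 := by
    intro a
    by_cases ha2 : a = m2
    · simp [ha2, h2]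
    · by_cases ha1 : a = m1
      · simp [ha1, h1]
      · simp [h0 a ha2 ha1]
  have hother : ∀ a, a ≠ m2 → f a ≤ 1 := by
    intro a ha2
    by_cases ha1 : a = m1
    · simp [ha1, h1]
    · simp [h0 a ha2 ha1]
  induction sa with
  | nil => simp
  | cons a t ih =>
    by_cases ha2 : a = m2
    · subst ha2
      simp [pvStep, h2, pv_fold_top f hle]
    · by_cases ha1 : a = m1
      · subst ha1
        simp [pvStep, h1, pv_fold_one f m2 h2 hle hother, ha2, Ne.symm ha2, hne.symm]
      · simp [pvStep, h0 a ha2 ha1, ih, ha2, ha1, Ne.symm ha2, Ne.symm ha1]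

theorem pv_fold_single (f : (Int × Int) → Int) (m : Int × Int)
    (h2 : f m = 2) (h0 : ∀ a, a ≠ m → f a = 0) (sa : List (Int × Int)) :
    (sa.foldl (pvStep f) (none, 0)).1 = if m ∈ sa then some m else none := by
  have hle : ∀ a, f a ≤ 2 := by
    intro a
    by_cases ha : a = m
    · simp [ha, h2]
    · simp [h0 a ha]
  induction sa with
  | nil => simp
  | cons a t ih =>
    by_cases ha : a = m
    · subst ha
      simp [pvStep, h2, pv_fold_top f hle]
    · simp [pvStep, h0 a ha, ih, ha, Ne.symm ha]


theorem pv_find_two (sa : List (Int × Int)) (m2 m1 : Int × Int) :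
    ([m2, m1].find? (fun action => sa.contains action))
    = if m2 ∈ sa then some m2 else if m1 ∈ sa then some m1 else none := by
  by_cases h2 : m2 ∈ sa <;> by_cases h1 : m1 ∈ sa <;> simp [List.find?, h2, h1]

theorem pv_find_one (sa : List (Int × Int)) (m : Int × Int) :
    ([m].find? (fun action => sa.contains action))
    = if m ∈ sa then some m else none := by
  by_cases h : m ∈ sa <;> simp [List.find?, h]

theorem pv_main (dx dy : Int) (sa : List (Int × Int)) :
    (if |dx| > |dy| then
        (if dx > 0 then [((1 : Int), (0 : Int))] else if dx < 0 then [(-1, 0)] else []) ++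
        (if dy > 0 then [((0 : Int), (1 : Int))] else if dy < 0 then [(0, -1)] else [])
      else
        (if dy > 0 then [((0 : Int), (1 : Int))] else if dy < 0 then [(0, -1)] else []) ++
        (if dx > 0 then [((1 : Int), (0 : Int))] else if dx < 0 then [(-1, 0)] else [])).find?
        (fun action => sa.contains action)
    = (sa.foldl
        (pvStep (fun a =>
          if dx ≠ 0 ∧ a = (if dx > 0 then ((1 : Int), (0 : Int)) else (-1, 0)) then
            (if |dx| > |dy| then 2 else 1)
          else if dy ≠ 0 ∧ a = (if dy > 0 then ((0 : Int), (1 : Int)) else (0, -1)) then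
            (if |dx| > |dy| then 1 else 2)
          else 0))
        ((none : Option (Int × Int)), (0 : Int))).1 := by
  rcases lt_trichotomy dx 0 with hx | hx | hx <;>
    rcases lt_trichotomy dy 0 with hy | hy | hy <;>
    (try subst hx) <;> (try subst hy)
  -- dx < 0, dy < 0
  · have hxne : dx ≠ 0 := by omega
    have hyne : dy ≠ 0 := by omega
    have hx0 : ¬ dx > 0 := by omega
    have hy0 : ¬ dy > 0 := by omega
    simp only [if_neg hx0, if_pos hx, if_neg hy0, if_pos hy]
    by_cases h : |dx| > |dy|
    · rw [if_pos h, List.singleton_append, show ([(-1,0),(0,-1)] : List (Int × Int)).find? (fun action => sa.contains action) = _ from pv_find_two sa _ _,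
        pv_fold_main _ ((-1 : Int), (0 : Int)) ((0 : Int), (-1 : Int)) (by decide)
          (by simp [hxne, hx0, h]) (by simp [hx0, hyne, hy0, h])
          (fun a ha2 ha1 => by simp [hx0, hy0, ha2, ha1])]
    · rw [if_neg h, List.singleton_append, show ([(0,-1),(-1,0)] : List (Int × Int)).find? (fun action => sa.contains action) = _ from pv_find_two sa _ _,
        pv_fold_main _ ((0 : Int), (-1 : Int)) ((-1 : Int), (0 : Int)) (by decide)
          (by simp [hx0, hyne, hy0, h]) (by simp [hxne, hx0, h])
          (fun a ha2 ha1 => by simp [hx0, hy0, ha2, ha1])]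
  -- dx < 0, dy = 0
  · have hxne : dx ≠ 0 := by omega
    have hx0 : ¬ dx > 0 := by omega
    have h : |dx| > |(0 : Int)| := by simpa using abs_pos.mpr hxne
    simp only [if_pos h, if_neg hx0, if_pos hx,
      if_neg (show ¬ (0 : Int) > 0 by omega), if_neg (show ¬ (0 : Int) < 0 by omega),
      List.append_nil]
    rw [pv_find_one, pv_fold_single _ ((-1 : Int), (0 : Int))
      (by simp [hxne, hx0, h]) (fun a ha => by simp [hx0, ha])]
  -- dx < 0, dy > 0
  · have hxne : dx ≠ 0 := by omega
    have hyne : dy ≠ 0 := by omega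
    have hx0 : ¬ dx > 0 := by omega
    simp only [if_neg hx0, if_pos hx, if_pos hy]
    by_cases h : |dx| > |dy|
    · rw [if_pos h, List.singleton_append, show ([(-1,0),(0,1)] : List (Int × Int)).find? (fun action => sa.contains action) = _ from pv_find_two sa _ _,
        pv_fold_main _ ((-1 : Int), (0 : Int)) ((0 : Int), (1 : Int)) (by decide)
          (by simp [hxne, hx0, h]) (by simp [hx0, hyne, hy, h])
          (fun a ha2 ha1 => by simp [hx0, hy, ha2, ha1])]
    · rw [if_neg h, List.singleton_append, show ([(0,1),(-1,0)] : List (Int × Int)).find? (fun action => sa.contains action) = _ from pv_find_two sa _ _,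
        pv_fold_main _ ((0 : Int), (1 : Int)) ((-1 : Int), (0 : Int)) (by decide)
          (by simp [hx0, hyne, hy, h]) (by simp [hxne, hx0, h])
          (fun a ha2 ha1 => by simp [hx0, hy, ha2, ha1])]
  -- dx = 0, dy < 0
  · have hyne : dy ≠ 0 := by omega
    have hy0 : ¬ dy > 0 := by omega
    have h : ¬ |(0 : Int)| > |dy| := by simpa using abs_nonneg dy
    simp only [if_neg h, if_neg hy0, if_pos hy,
      if_neg (show ¬ (0 : Int) > 0 by omega), if_neg (show ¬ (0 : Int) < 0 by omega),
      List.append_nil]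
    rw [pv_find_one, pv_fold_single _ ((0 : Int), (-1 : Int))
      (by simp [hyne, hy0, h]) (fun a ha => by simp [hy0, ha])]
  -- dx = 0, dy = 0
  · rw [pv_fold_zero _ (fun a => by simp)]
    simp
  -- dx = 0, dy > 0
  · have hyne : dy ≠ 0 := by omega
    have h : ¬ |(0 : Int)| > |dy| := by simpa using abs_nonneg dy
    simp only [if_neg h, if_pos hy,
      if_neg (show ¬ (0 : Int) > 0 by omega), if_neg (show ¬ (0 : Int) < 0 by omega),
      List.append_nil]
    rw [pv_find_one, pv_fold_single _ ((0 : Int), (1 : Int))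
      (by simp [hyne, hy, h]) (fun a ha => by simp [hy, ha])]
  -- dx > 0, dy < 0
  · have hxne : dx ≠ 0 := by omega
    have hyne : dy ≠ 0 := by omega
    have hy0 : ¬ dy > 0 := by omega
    simp only [if_pos hx, if_neg hy0, if_pos hy]
    by_cases h : |dx| > |dy|
    · rw [if_pos h, List.singleton_append, show ([(1,0),(0,-1)] : List (Int × Int)).find? (fun action => sa.contains action) = _ from pv_find_two sa _ _,
        pv_fold_main _ ((1 : Int), (0 : Int)) ((0 : Int), (-1 : Int)) (by decide)
          (by simp [hxne, hx, h]) (by simp [hx, hyne, hy0, h])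
          (fun a ha2 ha1 => by simp [hx, hy0, ha2, ha1])]
    · rw [if_neg h, List.singleton_append, show ([(0,-1),(1,0)] : List (Int × Int)).find? (fun action => sa.contains action) = _ from pv_find_two sa _ _,
        pv_fold_main _ ((0 : Int), (-1 : Int)) ((1 : Int), (0 : Int)) (by decide)
          (by simp [hx, hyne, hy0, h]) (by simp [hxne, hx, h])
          (fun a ha2 ha1 => by simp [hx, hy0, ha2, ha1])]
  -- dx > 0, dy = 0
  · have hxne : dx ≠ 0 := by omega
    have h : |dx| > |(0 : Int)| := by simpa using abs_pos.mpr hxne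
    simp only [if_pos h, if_pos hx,
      if_neg (show ¬ (0 : Int) > 0 by omega), if_neg (show ¬ (0 : Int) < 0 by omega),
      List.append_nil]
    rw [pv_find_one, pv_fold_single _ ((1 : Int), (0 : Int))
      (by simp [hxne, hx, h]) (fun a ha => by simp [hx, ha])]
  -- dx > 0, dy > 0
  · have hxne : dx ≠ 0 := by omega
    have hyne : dy ≠ 0 := by omega
    simp only [if_pos hx, if_pos hy]
    by_cases h : |dx| > |dy|
    · rw [if_pos h, List.singleton_append, show ([(1,0),(0,1)] : List (Int × Int)).find? (fun action => sa.contains action) = _ from pv_find_two sa _ _,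
        pv_fold_main _ ((1 : Int), (0 : Int)) ((0 : Int), (1 : Int)) (by decide)
          (by simp [hxne, hx, h]) (by simp [hx, hyne, hy, h])
          (fun a ha2 ha1 => by simp [hx, hy, ha2, ha1])]
    · rw [if_neg h, List.singleton_append, show ([(0,1),(1,0)] : List (Int × Int)).find? (fun action => sa.contains action) = _ from pv_find_two sa _ _,
        pv_fold_main _ ((0 : Int), (1 : Int)) ((1 : Int), (0 : Int)) (by decide)
          (by simp [hx, hyne, hy, h]) (by simp [hxne, hx, h])
          (fun a ha2 ha1 => by simp [hx, hy, ha2, ha1])]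

-- ===== VERDICT (by name: the statement is the Claim_ definition above) =====
theorem greedy_move_to_food_py_spec : Claim_equal_greedy_move_to_food_py := by
  intro head target_food safe_actions _
  show _ = _
  exact pv_main (target_food.1 - head.1) (target_food.2 - head.2) safe_actions
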